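-- pv_equiv track=rewrite | github.com/Goldensit0/University-Projects | Heuristics and Optimization/lab2/parte-1/CSPMaintenance.py | verificar_r6
-- ===== SOURCE A (Python) =====
-- def verificar_r6(asignaciones, talleres_std, talleres_spc, prk, aviones, franja):
--     # Filtrar los aviones tipo JMB en la franja específica
--     posiciones_jumbo = set()
--
--     # Filtrar los aviones JMB que están asignados a la franja actual y con tareas asignadas
--     aviones_jumbo = [avion for avion in aviones if avion['tipo'] == 'JMB' and (avion['T1'] == franja or avion['T2'] == franja)]
--
--     # Recoger las posiciones asignadas de los aviones Jumbo
--     for avion, asignacion in zip(aviones_jumbo, asignaciones):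
--         if asignacion is not None:  # Si el avión tiene asignación
--             posiciones_jumbo.add(asignacion)
--     # Así sacamos todas las posiciones de los JMB para poder verficiar las adyacentes,
--     # y poder quitarlas de nuestras soluciones
--
--     # Dimensiones de los talleres
--     max_filas = len(talleres_std)
--     max_columnas = len(talleres_std[0])
--     # para definir la matriz de los talleres, en la que comprobaremos las adyacencias
--
--     # Verificar si hay aviones Jumbo en talleres adyacentes
--     for pos in posiciones_jumbo:
--         if isinstance(pos, tuple) and len(pos) == 2:  # Asegurar formato correcto
--             x, y = pos
--
--             # Calcular las posiciones adyacentes válidas (sin diagonales x+1,y+1)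
--             adyacentes = [(x - 1, y), (x + 1, y), (x, y - 1), (x, y + 1)]
--             adyacentes = [
--                 (ax, ay) for ax, ay in adyacentes
--                 if 0 <= ax < max_filas and 0 <= ay < max_columnas
--             ]
--
--             # Si algún adyacente está ocupado por otro JUMBO en la misma franja, la restriccion no se cumple
--             if any(pos_ady in posiciones_jumbo for pos_ady in adyacentes):
--                 return False
--
--     return True
-- ===== SOURCE B (Python) =====
-- def verificar_r6(asignaciones, talleres_std, talleres_spc, prk, aviones, franja):
--     # Collect the cells occupied by jumbos in this time slot, then sweep the
--     # workshop grid itself: no occupied grid cell may have an occupied neighbor.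
--     jumbo = [avion for avion in aviones
--              if avion['tipo'] == 'JMB' and (avion['T1'] == franja or avion['T2'] == franja)]
--     ocupadas = {asg for _, asg in zip(jumbo, asignaciones) if asg is not None}
--     for x in range(len(talleres_std)):
--         for y in range(len(talleres_std[0])):
--             if (x, y) in ocupadas:
--                 if ((x - 1, y) in ocupadas or (x + 1, y) in ocupadas
--                         or (x, y - 1) in ocupadas or (x, y + 1) in ocupadas):
--                     return False
--     return True
-- ===== Notes on version B (the rewrite author's own statement) =====
-- stated objective: alternative
-- what changed: Instead of probing the four bounds-filtered neighbors of every collected position, B sweeps the workshop grid itself (x in range(rows), y in range(cols)) and fails when an occupied grid cell has an occupied orthogonal neighbor; Pre_ excludes empty talleres_std (A raises IndexError on talleres_std[0]) and aviones dicts missing a key the comprehension reads (KeyError).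
import Mathlib
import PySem

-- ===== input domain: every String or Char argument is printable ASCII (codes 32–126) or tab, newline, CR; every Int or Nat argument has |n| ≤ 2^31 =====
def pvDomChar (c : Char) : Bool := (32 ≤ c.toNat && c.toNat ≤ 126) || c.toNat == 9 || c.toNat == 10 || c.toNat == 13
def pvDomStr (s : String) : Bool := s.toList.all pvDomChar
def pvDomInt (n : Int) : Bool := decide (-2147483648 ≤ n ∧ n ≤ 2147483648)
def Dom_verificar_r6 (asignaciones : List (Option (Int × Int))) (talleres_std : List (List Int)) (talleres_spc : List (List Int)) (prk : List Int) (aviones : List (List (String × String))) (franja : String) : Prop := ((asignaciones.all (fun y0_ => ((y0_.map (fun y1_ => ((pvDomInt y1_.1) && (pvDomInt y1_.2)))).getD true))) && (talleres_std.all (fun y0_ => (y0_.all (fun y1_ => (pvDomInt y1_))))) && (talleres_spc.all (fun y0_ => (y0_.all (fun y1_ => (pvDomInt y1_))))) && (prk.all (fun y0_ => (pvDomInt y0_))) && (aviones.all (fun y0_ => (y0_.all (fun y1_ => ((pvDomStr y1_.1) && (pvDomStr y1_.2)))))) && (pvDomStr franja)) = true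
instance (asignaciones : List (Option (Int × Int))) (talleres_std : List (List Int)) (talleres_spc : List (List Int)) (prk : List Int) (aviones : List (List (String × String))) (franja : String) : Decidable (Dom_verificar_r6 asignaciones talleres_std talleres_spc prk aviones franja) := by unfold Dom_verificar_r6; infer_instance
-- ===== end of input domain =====

-- ===== PORT A =====
-- B replaces the per-position neighbor probe with a sweep over the workshop grid itself (alternative decomposition).
-- Port of A: collect jumbo positions into a set, then for each position probe its 4
-- bounds-filtered orthogonal neighbors for membership in the set.
-- (Python's `isinstance(pos, tuple) and len(pos) == 2` is always true under the typed domain.)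
-- A-side helper: the body of A's accumulation loop ('if asignacion is not None: add').
def addIfSome (s : PySem.Set (Int × Int)) (p : List (String × String) × Option (Int × Int)) : PySem.Set (Int × Int) :=
  match p.2 with
  | some a => PySem.Set.add s a
  | none => s
def verificar_r6 (asignaciones : List (Option (Int × Int))) (talleres_std : List (List Int)) (talleres_spc : List (List Int)) (prk : List Int) (aviones : List (List (String × String))) (franja : String) : Bool :=
  let aviones_jumbo := aviones.filter (fun avion =>
    ((avion.lookup "tipo").getD "" == "JMB") &&
    (((avion.lookup "T1").getD "" == franja) || ((avion.lookup "T2").getD "" == franja)))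
  let posiciones_jumbo : PySem.Set (Int × Int) :=
    (aviones_jumbo.zip asignaciones).foldl addIfSome PySem.Set.empty
  let max_filas : Int := talleres_std.length
  let max_columnas : Int := (((PySem.List.pyGet? talleres_std 0).getD []).length : Int)
  posiciones_jumbo.all (fun pos =>
    let adyacentes := [(pos.1 - 1, pos.2), (pos.1 + 1, pos.2), (pos.1, pos.2 - 1), (pos.1, pos.2 + 1)]
    let adyacentes := adyacentes.filter (fun q =>
      decide (0 ≤ q.1) && decide (q.1 < max_filas) && decide (0 ≤ q.2) && decide (q.2 < max_columnas))
    !(adyacentes.any (fun q => PySem.Set.contains posiciones_jumbo q)))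

-- ===== PORT B =====
-- Port of B: same collection, then sweep the grid coordinates; an occupied grid cell
-- with an occupied orthogonal neighbor violates the constraint.
def verificar_r6_alt (asignaciones : List (Option (Int × Int))) (talleres_std : List (List Int)) (talleres_spc : List (List Int)) (prk : List Int) (aviones : List (List (String × String))) (franja : String) : Bool :=
  let jumbo := aviones.filter (fun avion =>
    ((avion.lookup "tipo").getD "" == "JMB") &&
    (((avion.lookup "T1").getD "" == franja) || ((avion.lookup "T2").getD "" == franja)))
  let ocupadas : PySem.Set (Int × Int) :=
    PySem.Set.ofList ((jumbo.zip asignaciones).filterMap (fun p => p.2))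
  !((PySem.List.pyRange 0 (talleres_std.length : Int) 1).any (fun x =>
      (PySem.List.pyRange 0 (((PySem.List.pyGet? talleres_std 0).getD []).length : Int) 1).any (fun y =>
        PySem.Set.contains ocupadas (x, y) &&
        (PySem.Set.contains ocupadas (x - 1, y) || PySem.Set.contains ocupadas (x + 1, y) ||
         PySem.Set.contains ocupadas (x, y - 1) || PySem.Set.contains ocupadas (x, y + 1)))))

-- ===== PRECONDITION & SPEC =====
-- Pre_ excludes exactly the inputs where Python A raises: empty talleres_std (IndexError on
-- talleres_std[0]) and an avion dict missing a key the comprehension actually evaluates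
-- ('tipo'; 'T1' when tipo=='JMB'; 'T2' when additionally T1 != franja) (KeyError).
def Pre_verificar_r6 (asignaciones : List (Option (Int × Int))) (talleres_std : List (List Int)) (talleres_spc : List (List Int)) (prk : List Int) (aviones : List (List (String × String))) (franja : String) : Prop :=
  talleres_std ≠ [] ∧ ∀ avion ∈ aviones,
    (avion.lookup "tipo").isSome ∧
    (avion.lookup "tipo" = some "JMB" →
      (avion.lookup "T1").isSome ∧
      (avion.lookup "T1" ≠ some franja → (avion.lookup "T2").isSome))
instance (asignaciones : List (Option (Int × Int))) (talleres_std : List (List Int)) (talleres_spc : List (List Int)) (prk : List Int) (aviones : List (List (String × String))) (franja : String) : Decidable (Pre_verificar_r6 asignaciones talleres_std talleres_spc prk aviones franja) := by unfold Pre_verificar_r6; infer_instance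

def pvWitness_verificar_r6 : (List (Option (Int × Int))) × List (List Int) × List (List Int) × List Int × (List (List (String × String))) × String :=
  ([some (0, 0), some (0, 1)], [[0, 0], [0, 0]], [], [],
   [[("tipo", "JMB"), ("T1", "f1")], [("tipo", "JMB"), ("T1", "f1")]], "f1")

def Spec_verificar_r6 (asignaciones : List (Option (Int × Int))) (talleres_std : List (List Int)) (talleres_spc : List (List Int)) (prk : List Int) (aviones : List (List (String × String))) (franja : String) (out : Bool) : Prop := out = verificar_r6_alt asignaciones talleres_std talleres_spc prk aviones franja
instance (asignaciones : List (Option (Int × Int))) (talleres_std : List (List Int)) (talleres_spc : List (List Int)) (prk : List Int) (aviones : List (List (String × String))) (franja : String) (out : Bool) : Decidable (Spec_verificar_r6 asignaciones talleres_std talleres_spc prk aviones franja out) := by unfold Spec_verificar_r6; infer_instance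

-- ===== CLAIM (what is proved, stated in full; the proofs are below) =====
def Claim_equal_verificar_r6 : Prop := ∀ (asignaciones : List (Option (Int × Int))) (talleres_std : List (List Int)) (talleres_spc : List (List Int)) (prk : List Int) (aviones : List (List (String × String))) (franja : String), Dom_verificar_r6 asignaciones talleres_std talleres_spc prk aviones franja → Pre_verificar_r6 asignaciones talleres_std talleres_spc prk aviones franja → Spec_verificar_r6 asignaciones talleres_std talleres_spc prk aviones franja (verificar_r6 asignaciones talleres_std talleres_spc prk aviones franja)
-- ===== LEMMAS AND PROOFS =====

-- A's accumulation loop over the zipped list equals folding Set.add over the filterMap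
-- of the second components (B's collection, after ofList_eq_foldl).
theorem collect_eq (l : List (List (String × String) × Option (Int × Int))) (s : PySem.Set (Int × Int)) :
    l.foldl addIfSome s = (l.filterMap (fun p => p.2)).foldl PySem.Set.add s := by
  induction l generalizing s with
  | nil => rfl
  | cons h t ih =>
    cases hv : h.2 with
    | none => simp [List.foldl_cons, addIfSome, hv, ih]
    | some a => simp [List.foldl_cons, addIfSome, hv, ih]

theorem all_not_eq {α : Type} (S : List α) (f : α → Bool) :
    S.all (fun x => !f x) = !S.any f := by
  induction S with
  | nil => rfl
  | cons a t ih => simp [List.all_cons, List.any_cons, Bool.not_or, ih]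

-- A's probe ("some position has a bounds-filtered neighbor in the set") holds exactly when
-- B's grid sweep finds an occupied in-grid cell with an occupied orthogonal neighbor.
theorem probe_eq_sweep (S : List (Int × Int)) (F C : Int) :
    (S.any (fun pos =>
      ([(pos.1 - 1, pos.2), (pos.1 + 1, pos.2), (pos.1, pos.2 - 1), (pos.1, pos.2 + 1)].filter
          (fun q => decide (0 ≤ q.1) && decide (q.1 < F) && decide (0 ≤ q.2) && decide (q.2 < C))).any
          (fun q => PySem.Set.contains S q)))
    = ((PySem.List.pyRange 0 F 1).any (fun x => (PySem.List.pyRange 0 C 1).any (fun y =>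
        PySem.Set.contains S (x, y) &&
        (PySem.Set.contains S (x - 1, y) || PySem.Set.contains S (x + 1, y) ||
         PySem.Set.contains S (x, y - 1) || PySem.Set.contains S (x, y + 1))))) := by
  rw [Bool.eq_iff_iff]
  simp only [List.any_eq_true, List.mem_filter, Bool.and_eq_true, Bool.or_eq_true,
    decide_eq_true_eq, PySem.Set.contains_iff, PySem.List.mem_pyRange_one]
  constructor
  · rintro ⟨⟨a, b⟩, hp, ⟨x, y⟩, ⟨hm, hb⟩, hq⟩
    obtain ⟨⟨⟨h1, h2⟩, h3⟩, h4⟩ := hb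
    simp only [List.mem_cons, List.not_mem_nil, or_false, Prod.mk.injEq] at hm
    refine ⟨x, ⟨h1, h2⟩, y, ⟨h3, h4⟩, hq, ?_⟩
    rcases hm with ⟨e1, e2⟩ | ⟨e1, e2⟩ | ⟨e1, e2⟩ | ⟨e1, e2⟩
    · have h : ((x + 1 : ℤ), y) ∈ S := by
        rw [show ((x + 1 : ℤ), y) = (a, b) by rw [Prod.mk.injEq]; omega]; exact hp
      tauto
    · have h : ((x - 1 : ℤ), y) ∈ S := by
        rw [show ((x - 1 : ℤ), y) = (a, b) by rw [Prod.mk.injEq]; omega]; exact hp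
      tauto
    · have h : (x, (y + 1 : ℤ)) ∈ S := by
        rw [show (x, (y + 1 : ℤ)) = (a, b) by rw [Prod.mk.injEq]; omega]; exact hp
      tauto
    · have h : (x, (y - 1 : ℤ)) ∈ S := by
        rw [show (x, (y - 1 : ℤ)) = (a, b) by rw [Prod.mk.injEq]; omega]; exact hp
      tauto
  · rintro ⟨x, ⟨hx0, hxF⟩, y, ⟨hy0, hyC⟩, hq, hnb⟩
    rcases hnb with ((hp | hp) | hp) | hp
    · exact ⟨(x - 1, y), hp, (x, y),
        ⟨by simp only [List.mem_cons, List.not_mem_nil, or_false, Prod.mk.injEq, and_true]; omega,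
         ⟨⟨⟨hx0, hxF⟩, hy0⟩, hyC⟩⟩, hq⟩
    · exact ⟨(x + 1, y), hp, (x, y),
        ⟨by simp only [List.mem_cons, List.not_mem_nil, or_false, Prod.mk.injEq, and_true]; omega,
         ⟨⟨⟨hx0, hxF⟩, hy0⟩, hyC⟩⟩, hq⟩
    · exact ⟨(x, y - 1), hp, (x, y),
        ⟨by simp only [List.mem_cons, List.not_mem_nil, or_false, Prod.mk.injEq, true_and]; omega,
         ⟨⟨⟨hx0, hxF⟩, hy0⟩, hyC⟩⟩, hq⟩
    · exact ⟨(x, y + 1), hp, (x, y),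
        ⟨by simp only [List.mem_cons, List.not_mem_nil, or_false, Prod.mk.injEq, true_and]; omega,
         ⟨⟨⟨hx0, hxF⟩, hy0⟩, hyC⟩⟩, hq⟩

-- ===== VERDICT (by name: the statement is the Claim_ definition above) =====
theorem verificar_r6_spec : Claim_equal_verificar_r6 := by
  intro asignaciones talleres_std talleres_spc prk aviones franja _ _
  unfold Spec_verificar_r6 verificar_r6 verificar_r6_alt
  simp only [PySem.Set.ofList_eq_foldl, ← collect_eq, PySem.Set.empty]
  rw [show (fun (pos : Int × Int) =>
      !(([(pos.1 - 1, pos.2), (pos.1 + 1, pos.2), (pos.1, pos.2 - 1), (pos.1, pos.2 + 1)].filter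
          (fun q => decide (0 ≤ q.1) && decide (q.1 < (talleres_std.length : Int)) && decide (0 ≤ q.2) &&
            decide (q.2 < (((PySem.List.pyGet? talleres_std 0).getD []).length : Int)))).any
          (fun q => PySem.Set.contains _ q))) = _ from rfl]
  rw [all_not_eq, probe_eq_sweep]
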